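-- pv_equiv track=rewrite | github.com/sergey-karavanets/course_python | Вложенные списки/Матрицы. Часть 1/Programming (5)/task.py | search_maximum
-- ===== SOURCE A (Python) =====
-- def search_maximum(matrix, n):
--     maximum = -99999
--     for i in range(n):
--         for j in range(n):
--             if i >= j and i <= n-1-j and matrix[i][j] > maximum:
--                 maximum = matrix[i][j]
--     for i in range(n):
--         for j in range(n):
--             if i <= j and i >= n-1-j and matrix[i][j] > maximum:
--                 maximum = matrix[i][j]
--     return maximum
-- ===== SOURCE B (Python) =====
-- def search_maximum(matrix, n):
--     maximum = -99999
--     for i in range(n):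
--         row = matrix[i]
--         lo = min(i, n - 1 - i)
--         hi = max(i, n - 1 - i)
--         for v in row[0:lo + 1]:
--             if v > maximum:
--                 maximum = v
--         for v in row[hi:n]:
--             if v > maximum:
--                 maximum = v
--     return maximum
-- ===== Notes on version B (the rewrite author's own statement) =====
-- stated objective: alternative
-- what changed: Replaced A's two full n x n scans that test the triangle inequalities on every cell with a single loop over rows that folds the maximum over the two qualifying column segments of each row, taken directly as slices row[0:min(i,n-1-i)+1] and row[max(i,n-1-i):n].
import Mathlib
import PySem

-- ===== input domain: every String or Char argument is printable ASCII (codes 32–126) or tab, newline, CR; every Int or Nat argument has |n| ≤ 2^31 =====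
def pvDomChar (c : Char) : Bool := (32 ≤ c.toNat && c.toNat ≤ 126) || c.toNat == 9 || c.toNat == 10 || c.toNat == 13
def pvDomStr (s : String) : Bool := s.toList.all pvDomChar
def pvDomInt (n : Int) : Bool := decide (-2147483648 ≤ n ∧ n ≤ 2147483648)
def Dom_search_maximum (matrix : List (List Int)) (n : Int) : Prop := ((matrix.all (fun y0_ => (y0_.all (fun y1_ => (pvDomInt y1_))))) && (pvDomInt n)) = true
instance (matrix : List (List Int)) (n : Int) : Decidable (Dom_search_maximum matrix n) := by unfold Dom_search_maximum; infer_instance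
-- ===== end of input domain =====

-- B replaces A's two full n×n scans (testing the triangle inequalities on every cell) by a
-- single loop over the rows that takes the two qualifying column segments of each row as
-- slices; same return value, different traversal.

-- ===== PORT A =====
def search_maximum (matrix : List (List Int)) (n : Int) : Int :=
  (PySem.List.pyRange 0 n 1).foldl
    (fun maximum i =>
      (PySem.List.pyRange 0 n 1).foldl
        (fun maximum j =>
          if i ≥ j ∧ i ≤ n - 1 - j ∧ PySem.List.pyGetD (PySem.List.pyGetD matrix i []) j 0 > maximum
          then PySem.List.pyGetD (PySem.List.pyGetD matrix i []) j 0 else maximum)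
        maximum)
    (-99999)
  |> fun maximum =>
  (PySem.List.pyRange 0 n 1).foldl
    (fun maximum i =>
      (PySem.List.pyRange 0 n 1).foldl
        (fun maximum j =>
          if i ≤ j ∧ i ≥ n - 1 - j ∧ PySem.List.pyGetD (PySem.List.pyGetD matrix i []) j 0 > maximum
          then PySem.List.pyGetD (PySem.List.pyGetD matrix i []) j 0 else maximum)
        maximum)
    maximum

-- ===== PORT B =====
def search_maximum_alt (matrix : List (List Int)) (n : Int) : Int :=
  (PySem.List.pyRange 0 n 1).foldl
    (fun maximum i =>
      let row := PySem.List.pyGetD matrix i []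
      let lo := min i (n - 1 - i)
      let hi := max i (n - 1 - i)
      let maximum := (PySem.List.slice row (some 0) (some (lo + 1))).foldl
        (fun m v => if v > m then v else m) maximum
      (PySem.List.slice row (some hi) (some n)).foldl
        (fun m v => if v > m then v else m) maximum)
    (-99999)

-- ===== PRECONDITION & SPEC =====
-- Pre_ = exactly the inputs where A's indexing never raises: at least n rows, and each of the
-- first n rows has at least n entries (column n-1 of every row is inspected by the second pass).
def Pre_search_maximum (matrix : List (List Int)) (n : Int) : Prop :=
  n ≤ (matrix.length : Int) ∧ ∀ row ∈ matrix.take n.toNat, n ≤ (row.length : Int)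
instance (matrix : List (List Int)) (n : Int) : Decidable (Pre_search_maximum matrix n) := by
  unfold Pre_search_maximum; infer_instance
def pvWitness_search_maximum : List (List Int) × Int := ([[1, 2], [3, 4]], 2)

def Spec_search_maximum (matrix : List (List Int)) (n : Int) (out : Int) : Prop := out = search_maximum_alt matrix n
instance (matrix : List (List Int)) (n : Int) (out : Int) : Decidable (Spec_search_maximum matrix n out) := by unfold Spec_search_maximum; infer_instance

-- ===== CLAIM (what is proved, stated in full; the proofs are below) =====
def Claim_equal_search_maximum : Prop := ∀ (matrix : List (List Int)) (n : Int), Dom_search_maximum matrix n → Pre_search_maximum matrix n → Spec_search_maximum matrix n (search_maximum matrix n)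

-- ===== LEMMAS AND PROOFS =====

lemma pv_ite_max (a x : Int) : (if x > a then x else a) = max a x := by
  rw [max_def]; split_ifs <;> omega

-- A's inner j-loop: a conditioned running max is the max fold over the filtered, projected list.
lemma pv_foldl_tri (c1 c2 : Int → Prop) [DecidablePred c1] [DecidablePred c2]
    (g : Int → Int) :
    ∀ (l : List Int) (a : Int),
      l.foldl (fun a j => if c1 j ∧ c2 j ∧ g j > a then g j else a) a
        = ((l.filter (fun j => decide (c1 j ∧ c2 j))).map g).foldl max a := by
  intro l
  induction l with
  | nil => intro a; rfl
  | cons x l ih =>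
    intro a
    by_cases h1 : c1 x
    · by_cases h2 : c2 x
      · simp [h1, h2, ih, pv_ite_max]
      · simp [h1, h2, ih]
    · simp [h1, ih]

lemma pv_foldl_step_eq_max (l : List Int) (a : Int) :
    l.foldl (fun m v => if v > m then v else m) a = l.foldl max a := by
  apply PySem.List.foldl_congr_mem
  intro acc x _; exact pv_ite_max acc x

lemma pv_filter_left (n i : Int) (h0 : 0 ≤ i) (hn : i < n) :
    (PySem.List.pyRange 0 n 1).filter (fun j => decide (i ≥ j ∧ i ≤ n - 1 - j))
      = PySem.List.pyRange 0 (min i (n - 1 - i) + 1) 1 := by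
  rw [PySem.List.pyRange_one_append 0 (min i (n - 1 - i) + 1) n (by omega) (by omega),
      List.filter_append]
  have e1 : (PySem.List.pyRange 0 (min i (n - 1 - i) + 1) 1).filter
      (fun j => decide (i ≥ j ∧ i ≤ n - 1 - j)) = PySem.List.pyRange 0 (min i (n - 1 - i) + 1) 1 := by
    refine List.filter_eq_self.2 ?_
    intro j hj
    rw [PySem.List.mem_pyRange_one] at hj
    simp only [decide_eq_true_eq]
    omega
  have e2 : (PySem.List.pyRange (min i (n - 1 - i) + 1) n 1).filter
      (fun j => decide (i ≥ j ∧ i ≤ n - 1 - j)) = [] := by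
    refine List.filter_eq_nil_iff.2 ?_
    intro j hj
    rw [PySem.List.mem_pyRange_one] at hj
    simp only [decide_eq_true_eq]
    omega
  rw [e1, e2, List.append_nil]

lemma pv_filter_right (n i : Int) (h0 : 0 ≤ i) (hn : i < n) :
    (PySem.List.pyRange 0 n 1).filter (fun j => decide (i ≤ j ∧ i ≥ n - 1 - j))
      = PySem.List.pyRange (max i (n - 1 - i)) n 1 := by
  rw [PySem.List.pyRange_one_append 0 (max i (n - 1 - i)) n (by omega) (by omega),
      List.filter_append]
  have e1 : (PySem.List.pyRange 0 (max i (n - 1 - i)) 1).filter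
      (fun j => decide (i ≤ j ∧ i ≥ n - 1 - j)) = [] := by
    refine List.filter_eq_nil_iff.2 ?_
    intro j hj
    rw [PySem.List.mem_pyRange_one] at hj
    simp only [decide_eq_true_eq]
    omega
  have e2 : (PySem.List.pyRange (max i (n - 1 - i)) n 1).filter
      (fun j => decide (i ≤ j ∧ i ≥ n - 1 - j)) = PySem.List.pyRange (max i (n - 1 - i)) n 1 := by
    refine List.filter_eq_self.2 ?_
    intro j hj
    rw [PySem.List.mem_pyRange_one] at hj
    simp only [decide_eq_true_eq]
    omega
  rw [e1, e2, List.nil_append]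

lemma pv_map_getD_range (xs : List Int) (a b : Int) (h0 : 0 ≤ a) (hab : a ≤ b)
    (hb : b ≤ (xs.length : Int)) :
    (PySem.List.pyRange a b 1).map (fun j => PySem.List.pyGetD xs j 0)
      = (xs.drop a.toNat).take (b.toNat - a.toNat) := by
  have h1 := PySem.List.map_pyGetD_pyRange' (xs := xs) (a := a) (d := 0) h0
  rw [PySem.List.pyRange_one_append a b (xs.length : Int) hab hb, List.map_append,
      PySem.List.map_pyGetD_pyRange' (xs := xs) (a := b) (d := 0) (by omega)] at h1
  have h2 : (xs.drop a.toNat).drop (b.toNat - a.toNat) = xs.drop b.toNat := by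
    rw [List.drop_drop]
    congr 1
    omega
  have h3 : xs.drop a.toNat
      = (xs.drop a.toNat).take (b.toNat - a.toNat) ++ xs.drop b.toNat := by
    rw [← h2, List.take_append_drop]
  rw [h3] at h1
  exact List.append_cancel_right h1

lemma pv_foldl_max_out : ∀ (l : List Int) (a x : Int), l.foldl max (max a x) = max (l.foldl max a) x := by
  intro l
  induction l with
  | nil => intro a x; rfl
  | cons y l ih =>
    intro a x
    simp only [List.foldl_cons]
    rw [max_right_comm, ih]

lemma pv_foldl_max_swap : ∀ (t s : List Int) (a : Int),
    t.foldl max (s.foldl max a) = s.foldl max (t.foldl max a) := by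
  intro t
  induction t with
  | nil => intro s a; rfl
  | cons y t ih =>
    intro s a
    simp only [List.foldl_cons]
    rw [← pv_foldl_max_out s a y, ih]

lemma pv_pass_comm (f : Int → List Int) :
    ∀ (l : List Int) (t : List Int) (a : Int),
      l.foldl (fun a i => (f i).foldl max a) (t.foldl max a)
        = t.foldl max (l.foldl (fun a i => (f i).foldl max a) a) := by
  intro l
  induction l with
  | nil => intro t a; rfl
  | cons x l ih =>
    intro t a
    simp only [List.foldl_cons]
    rw [pv_foldl_max_swap (f x) t a, ih]

-- The two sequential triangle passes of A fuse into B's single per-row pass.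
lemma pv_fuse (f g : Int → List Int) :
    ∀ (l : List Int) (init : Int),
      l.foldl (fun a i => (g i).foldl max a) (l.foldl (fun a i => (f i).foldl max a) init)
        = l.foldl (fun a i => (g i).foldl max ((f i).foldl max a)) init := by
  intro l
  induction l with
  | nil => intro init; rfl
  | cons x l ih =>
    intro init
    simp only [List.foldl_cons]
    rw [← pv_pass_comm f l (g x) ((f x).foldl max init), ih]

-- a member of the first n rows of the matrix, as pyGetD sees it
lemma pv_row_len (matrix : List (List Int)) (n i : Int)
    (hlen : n ≤ (matrix.length : Int))
    (hrows : ∀ row ∈ matrix.take n.toNat, n ≤ (row.length : Int))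
    (h0 : 0 ≤ i) (hn : i < n) :
    n ≤ ((PySem.List.pyGetD matrix i []).length : Int) := by
  have hi : i.toNat < matrix.length := by omega
  rw [PySem.List.pyGetD_eq_getElem matrix [] h0 (by omega)]
  refine hrows _ ?_
  exact List.mem_take_iff_getElem.2 ⟨i.toNat, by omega, rfl⟩

-- ===== VERDICT (by name: the statement is the Claim_ definition above) =====
theorem search_maximum_spec : Claim_equal_search_maximum := by
  intro matrix n _ hpre
  obtain ⟨hlen, hrows⟩ := hpre
  unfold Spec_search_maximum search_maximum search_maximum_alt
  -- canonical per-row segments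
  have hmem : ∀ i ∈ PySem.List.pyRange 0 n 1, 0 ≤ i ∧ i < n := by
    intro i hi; rw [PySem.List.mem_pyRange_one] at hi; exact hi
  -- rewrite A's first pass
  have hA1 : (PySem.List.pyRange 0 n 1).foldl
      (fun maximum i =>
        (PySem.List.pyRange 0 n 1).foldl
          (fun maximum j =>
            if i ≥ j ∧ i ≤ n - 1 - j ∧ PySem.List.pyGetD (PySem.List.pyGetD matrix i []) j 0 > maximum
            then PySem.List.pyGetD (PySem.List.pyGetD matrix i []) j 0 else maximum)
          maximum) (-99999)
      = (PySem.List.pyRange 0 n 1).foldl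
        (fun a i => (((PySem.List.pyGetD matrix i []).drop (0:Int).toNat).take
            ((min i (n - 1 - i) + 1).toNat - (0:Int).toNat)).foldl max a) (-99999) := by
    apply PySem.List.foldl_congr_mem
    intro acc i hi
    obtain ⟨h0, hn⟩ := hmem i hi
    rw [pv_foldl_tri (fun j => i ≥ j) (fun j => i ≤ n - 1 - j)
          (fun j => PySem.List.pyGetD (PySem.List.pyGetD matrix i []) j 0),
        pv_filter_left n i h0 hn,
        pv_map_getD_range _ _ _ (by omega) (by omega)
          (le_trans (by omega) (pv_row_len matrix n i hlen hrows h0 hn))]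
  have hA2 : ∀ m : Int, (PySem.List.pyRange 0 n 1).foldl
      (fun maximum i =>
        (PySem.List.pyRange 0 n 1).foldl
          (fun maximum j =>
            if i ≤ j ∧ i ≥ n - 1 - j ∧ PySem.List.pyGetD (PySem.List.pyGetD matrix i []) j 0 > maximum
            then PySem.List.pyGetD (PySem.List.pyGetD matrix i []) j 0 else maximum)
          maximum) m
      = (PySem.List.pyRange 0 n 1).foldl
        (fun a i => (((PySem.List.pyGetD matrix i []).drop (max i (n - 1 - i)).toNat).take
            (n.toNat - (max i (n - 1 - i)).toNat)).foldl max a) m := by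
    intro m
    apply PySem.List.foldl_congr_mem
    intro acc i hi
    obtain ⟨h0, hn⟩ := hmem i hi
    rw [pv_foldl_tri (fun j => i ≤ j) (fun j => i ≥ n - 1 - j)
          (fun j => PySem.List.pyGetD (PySem.List.pyGetD matrix i []) j 0),
        pv_filter_right n i h0 hn,
        pv_map_getD_range _ _ _ (by omega) (by omega)
          (pv_row_len matrix n i hlen hrows h0 hn)]
  -- rewrite B into the same per-row segments
  have hB : (PySem.List.pyRange 0 n 1).foldl
      (fun maximum i =>
        let row := PySem.List.pyGetD matrix i []
        let lo := min i (n - 1 - i)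
        let hi := max i (n - 1 - i)
        let maximum := (PySem.List.slice row (some 0) (some (lo + 1))).foldl
          (fun m v => if v > m then v else m) maximum
        (PySem.List.slice row (some hi) (some n)).foldl
          (fun m v => if v > m then v else m) maximum) (-99999)
      = (PySem.List.pyRange 0 n 1).foldl
        (fun a i => (((PySem.List.pyGetD matrix i []).drop (max i (n - 1 - i)).toNat).take
              (n.toNat - (max i (n - 1 - i)).toNat)).foldl max
            ((((PySem.List.pyGetD matrix i []).drop (0:Int).toNat).take
              ((min i (n - 1 - i) + 1).toNat - (0:Int).toNat)).foldl max a)) (-99999) := by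
    apply PySem.List.foldl_congr_mem
    intro acc i hi
    obtain ⟨h0, hn⟩ := hmem i hi
    dsimp only
    rw [pv_foldl_step_eq_max, pv_foldl_step_eq_max,
      PySem.List.slice_toNat _ (by omega : (0:Int) ≤ 0) (by omega : (0:Int) ≤ min i (n - 1 - i) + 1),
      PySem.List.slice_toNat _ (by omega : (0:Int) ≤ max i (n - 1 - i)) (by omega : (0:Int) ≤ n)]
  simp only []
  rw [hA2, hA1, hB,
    pv_fuse (fun i => ((PySem.List.pyGetD matrix i []).drop (0:Int).toNat).take
        ((min i (n - 1 - i) + 1).toNat - (0:Int).toNat))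
      (fun i => ((PySem.List.pyGetD matrix i []).drop (max i (n - 1 - i)).toNat).take
        (n.toNat - (max i (n - 1 - i)).toNat))]
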